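-- pv_equiv track=rewrite | github.com/Shiido123/pratique_bac_pc_nsi | sujet20/exo1.py | mini
-- ===== SOURCE A (Python) =====
-- def mini(releve, date):
--     temp_min = releve[0]
--     indice_min = 0
--     for indice, valeur in enumerate(releve):
--         if valeur < temp_min:
--             temp_min = valeur
--             indice_min = indice
--
--     date_assoc = date[indice_min]
--     return temp_min, date_assoc
-- ===== SOURCE B (Python) =====
-- def mini(releve, date):
--     # Two separate passes: first find the minimum value, then locate its
--     # first position with list.index, instead of tracking the index in-loop.
--     temp_min = releve[0]
--     for valeur in releve[1:]:
--         if valeur < temp_min: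
--             temp_min = valeur
--     indice_min = releve.index(temp_min)
--     return temp_min, date[indice_min]
-- ===== Notes on version B (the rewrite author's own statement) =====
-- stated objective: alternative
-- what changed: B splits the work into two passes: a value-only minimum scan over releve[1:] followed by releve.index(temp_min) to locate the first occurrence, instead of A's single enumerate loop tracking (value, index) together.
import Mathlib
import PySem

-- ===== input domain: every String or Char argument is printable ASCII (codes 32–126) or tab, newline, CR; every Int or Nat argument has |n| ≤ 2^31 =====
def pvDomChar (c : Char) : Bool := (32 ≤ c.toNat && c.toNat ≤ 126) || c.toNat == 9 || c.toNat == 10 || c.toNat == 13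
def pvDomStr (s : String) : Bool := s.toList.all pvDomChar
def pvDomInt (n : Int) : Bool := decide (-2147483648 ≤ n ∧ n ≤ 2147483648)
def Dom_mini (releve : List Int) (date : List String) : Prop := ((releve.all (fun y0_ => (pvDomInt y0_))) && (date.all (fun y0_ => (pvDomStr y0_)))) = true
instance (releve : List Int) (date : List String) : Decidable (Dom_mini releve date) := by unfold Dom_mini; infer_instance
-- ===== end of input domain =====

-- B finds the minimum value in one value-only pass and then locates its first index
-- with list.index in a second pass, instead of A's single index-tracking loop (alternative decomposition).

-- ===== PORT A =====
def mini (releve : List Int) (date : List String) : Int × String :=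
  match releve with
  | [] => (0, "")  -- releve[0] raises IndexError: outside Pre_mini
  | t0 :: _ =>
    let s := (PySem.List.enumerate releve 0).foldl
      (fun (st : Int × Int) p => if p.2 < st.1 then (p.2, p.1) else st) (t0, 0)
    (s.1, (PySem.List.pyGet? date s.2).getD "")  -- none = IndexError: outside Pre_mini

-- ===== PORT B =====
def mini_alt (releve : List Int) (date : List String) : Int × String :=
  match releve with
  | [] => (0, "")  -- releve[0] raises IndexError: outside Pre_mini
  | t0 :: rest =>
    let tm := rest.foldl (fun m v => if v < m then v else m) t0
    let i : Nat := (PySem.List.index? releve tm).getD 0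
    (tm, (PySem.List.pyGet? date (i : Int)).getD "")  -- none = IndexError: outside Pre_mini

-- ===== PRECONDITION & SPEC =====
-- Pre_mini is exactly where the Python A returns: releve nonempty (else releve[0] raises
-- IndexError) and the first index of releve's minimum in range of date (else date[indice_min]
-- raises IndexError).
def Pre_mini (releve : List Int) (date : List String) : Prop :=
  releve ≠ [] ∧
    releve.idxOf ((PySem.List.min? releve (fun y => y)).getD 0) < date.length
instance (releve : List Int) (date : List String) : Decidable (Pre_mini releve date) := by
  unfold Pre_mini; infer_instance
def pvWitness_mini : List Int × List String := ([3, 1, 2], ["a", "b", "c"])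

def Spec_mini (releve : List Int) (date : List String) (out : Int × String) : Prop := out = mini_alt releve date
instance (releve : List Int) (date : List String) (out : Int × String) : Decidable (Spec_mini releve date out) := by unfold Spec_mini; infer_instance

-- ===== CLAIM (what is proved, stated in full; the proofs are below) =====
def Claim_equal_mini : Prop := ∀ (releve : List Int) (date : List String), Dom_mini releve date → Pre_mini releve date → Spec_mini releve date (mini releve date)

-- ===== LEMMAS AND PROOFS =====

theorem foldl_min_le_seed (l : List Int) (m : Int) : l.foldl min m ≤ m := by
  induction l generalizing m with
  | nil => simp
  | cons a t ih => exact le_trans (ih (min m a)) (min_le_left _ _)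

theorem foldl_min_mem_or (l : List Int) (m : Int) :
    l.foldl min m = m ∨ l.foldl min m ∈ l := by
  induction l generalizing m with
  | nil => left; rfl
  | cons a t ih =>
    rcases ih (min m a) with h | h
    · rw [List.foldl_cons, h, min_def]
      split_ifs with hma
      · left; rfl
      · right; simp
    · right; simp [List.foldl_cons, h]

theorem idxOf?_of_mem (l : List Int) (v : Int) (h : v ∈ l) :
    List.idxOf? v l = some (List.idxOf v l) := by
  induction l with
  | nil => simp at h
  | cons a t ih =>
    by_cases hav : a = v
    · simp [List.idxOf?_cons, hav]
    · have hv : v ∈ t := by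
        rcases List.mem_cons.mp h with h' | h'
        · exact absurd h'.symm hav
        · exact h'
      simp [List.idxOf?_cons, hav, ih hv]

-- A's index-tracking loop over enumerate, characterised in closed form.
theorem loopA (l : List Int) (n m i : Int) :
    (PySem.List.enumerate l n).foldl
        (fun (st : Int × Int) p => if p.2 < st.1 then (p.2, p.1) else st) (m, i)
      = (l.foldl min m,
         if l.foldl min m = m then i
         else n + (l.idxOf (l.foldl min m) : Int)) := by
  induction l generalizing n m i with
  | nil => simp [PySem.List.enumerate_nil]
  | cons a t ih =>
    rw [PySem.List.enumerate_cons, List.foldl_cons, List.foldl_cons]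
    by_cases hav : a < m
    · have hma : min m a = a := by rw [min_def]; omega
      simp only [hav, if_pos, hma]
      rw [ih (n + 1) a n]
      have hle : t.foldl min a ≤ a := foldl_min_le_seed t a
      have hnm : t.foldl min a ≠ m := by omega
      by_cases hMa : t.foldl min a = a
      · have h0 : List.idxOf (t.foldl min a) (a :: t) = 0 := by
          simp [hMa]
        rw [if_pos hMa, if_neg hnm, h0]
        simp
      · have h2 : (a == t.foldl min a) = false := by
          simp only [beq_eq_false_iff_ne, ne_eq]
          omega
        rw [if_neg hMa, if_neg hnm, List.idxOf_cons, h2, cond_false]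
        simp only [Prod.mk.injEq, true_and]
        push_cast
        ring
    · have hma : min m a = m := by rw [min_def]; omega
      simp only [hav, if_neg, not_false_iff, hma]
      rw [ih (n + 1) m i]
      by_cases hMm : t.foldl min m = m
      · simp [hMm]
      · have hle : t.foldl min m ≤ m := foldl_min_le_seed t m
        have h2 : (a == t.foldl min m) = false := by
          simp only [beq_eq_false_iff_ne, ne_eq]
          omega
        rw [if_neg hMm, if_neg hMm, List.idxOf_cons, h2, cond_false]
        simp only [Prod.mk.injEq, true_and]
        push_cast
        ring

theorem foldl_if_eq_foldl_min (l : List Int) (m : Int) :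
    l.foldl (fun m v => if v < m then v else m) m = l.foldl min m := by
  have : (fun (m v : Int) => if v < m then v else m) = min := by
    funext x y
    rw [min_def]
    split_ifs <;> omega
  rw [this]

theorem mini_spec : Claim_equal_mini := by
  intro releve date _ hpre
  unfold Spec_mini
  obtain ⟨hne, -⟩ := hpre
  match releve with
  | [] => exact absurd rfl hne
  | t0 :: rest =>
    simp only [mini, mini_alt]
    rw [loopA (t0 :: rest) 0 t0 0]
    rw [foldl_if_eq_foldl_min]
    have hfold : (t0 :: rest).foldl min t0 = rest.foldl min t0 := by
      simp [List.foldl_cons]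
    rw [hfold]
    set M := rest.foldl min t0 with hM
    have hmem : M ∈ t0 :: rest := by
      rcases foldl_min_mem_or rest t0 with h | h
      · rw [hM, h]; exact List.mem_cons_self
      · exact List.mem_cons_of_mem _ h
    have hidx : PySem.List.index? (t0 :: rest) M = some (List.idxOf M (t0 :: rest)) := by
      rw [PySem.List.index?_eq_idxOf?, idxOf?_of_mem _ _ hmem]
    rw [hidx]
    have hidx0 : (if M = t0 then (0 : Int) else 0 + (List.idxOf M (t0 :: rest) : Int))
        = (List.idxOf M (t0 :: rest) : Int) := by
      split_ifs with h
      · have h0 : List.idxOf M (t0 :: rest) = 0 := by simp [h]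
        rw [h0]
        simp
      · ring
    rw [hidx0]
    rfl
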